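-- pv_equiv track=rewrite | github.com/STStromback/pokemon_optimization | new/data/gen_1/create_variants_gen_1.py | generate_variants
-- ===== SOURCE A (Python) =====
-- from itertools import combinations
--
-- def generate_variants(types):
--     # Generate all unique combinations of up to four types
--     variants = set()
--     types = sorted(set(types))  # Sort and remove duplicates
--     for r in range(1, 5):  # From 1 type to 4 types
--         for combo in combinations(types, r):
--             # Pad with 'none' to ensure all variants have four elements
--             full_combo = list(combo) + ['none'] * (4 - len(combo))
--             variants.add(tuple(full_combo))
--     return variants
-- ===== SOURCE B (Python) =====
-- def generate_variants(types):
--     # Single right-to-left DP pass: maintain all combinations of size 1..4 of the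
--     # suffix processed so far (in lexicographic index order), instead of calling
--     # itertools.combinations once per size.
--     ts = sorted(set(types))
--     b1, b2, b3, b4 = [], [], [], []
--     for t in reversed(ts):
--         b4 = [(t,) + c for c in b3] + b4
--         b3 = [(t,) + c for c in b2] + b3
--         b2 = [(t,) + c for c in b1] + b2
--         b1 = [(t,)] + b1
--     return set(c + ('none',) * (4 - len(c)) for bs in (b1, b2, b3, b4) for c in bs)
-- ===== Notes on version B (the rewrite author's own statement) =====
-- stated objective: alternative
-- what changed: Replaces the per-size itertools.combinations double loop and element-wise set.add with a single reversed DP pass that maintains the size-1..4 combination lists of the processed suffix, building the set once at the end.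
import Mathlib
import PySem

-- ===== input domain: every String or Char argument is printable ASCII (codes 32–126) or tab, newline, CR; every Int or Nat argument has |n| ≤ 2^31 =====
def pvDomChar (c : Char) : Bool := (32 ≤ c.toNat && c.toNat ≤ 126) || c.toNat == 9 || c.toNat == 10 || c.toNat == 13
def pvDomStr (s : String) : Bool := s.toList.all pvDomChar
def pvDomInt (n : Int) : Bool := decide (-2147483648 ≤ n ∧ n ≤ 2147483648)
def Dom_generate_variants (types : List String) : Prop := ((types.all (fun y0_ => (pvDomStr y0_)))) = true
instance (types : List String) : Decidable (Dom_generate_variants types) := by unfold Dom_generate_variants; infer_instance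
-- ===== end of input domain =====

-- B replaces A's per-size itertools.combinations loops by a single reversed DP pass that
-- maintains the combinations of sizes 1..4 of the processed suffix (objective: alternative).

-- ===== PORT A =====
-- 'tuple(list(combo) + ["none"] * (4 - len(combo)))' — shared padding expression of both Pythons
def pvPad (c : List String) : String × String × String × String :=
  match c ++ List.replicate (4 - c.length) "none" with
  | [a, b, cc, d] => (a, b, cc, d)
  | _ => ("none", "none", "none", "none")  -- unreachable: the padded list always has length 4

-- itertools.combinations(l, r): lexicographic-by-index combinations (A-side helper)
def pvCombinations : List String → Nat → List (List String)
  | _, 0 => [[]]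
  | [], _+1 => []
  | x :: xs, r+1 => ((pvCombinations xs r).map (fun c => x :: c)) ++ pvCombinations xs (r+1)

def generate_variants (types : List String) : List (String × String × String × String) :=
  let ts := PySem.List.sorted (PySem.Set.ofList types) (fun x => x) false
  (PySem.List.pyRange 1 5 1).foldl
    (fun variants r =>
      (pvCombinations ts r.toNat).foldl
        (fun variants combo => PySem.Set.add variants (pvPad combo)) variants)
    PySem.Set.empty

-- ===== PORT B =====
-- one step of B's loop body: b4..b1 updated from the pre-step values ((t,)+c prepends)
def pvStep (st : List (List String) × List (List String) × List (List String) × List (List String))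
    (t : String) :
    List (List String) × List (List String) × List (List String) × List (List String) :=
  match st with
  | (b1, b2, b3, b4) =>
    ([[t]] ++ b1,
     b1.map (fun c => t :: c) ++ b2,
     b2.map (fun c => t :: c) ++ b3,
     b3.map (fun c => t :: c) ++ b4)

def generate_variants_alt (types : List String) : List (String × String × String × String) :=
  let ts := PySem.List.sorted (PySem.Set.ofList types) (fun x => x) false
  match ts.reverse.foldl pvStep ([], [], [], []) with   -- 'for t in reversed(ts)'
  | (b1, b2, b3, b4) =>
    PySem.Set.ofList ([b1, b2, b3, b4].flatMap (fun bs => bs.map pvPad))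

-- ===== PRECONDITION & SPEC =====
def Spec_generate_variants (types : List String) (out : List (String × String × String × String)) : Prop := out = generate_variants_alt types
instance (types : List String) (out : List (String × String × String × String)) : Decidable (Spec_generate_variants types out) := by unfold Spec_generate_variants; infer_instance

-- ===== CLAIM (what is proved, stated in full; the proofs are below) =====
def Claim_equal_generate_variants : Prop := ∀ (types : List String), Dom_generate_variants types → Spec_generate_variants types (generate_variants types)

-- ===== LEMMAS AND PROOFS =====

lemma pvCombinations_zero (l : List String) : pvCombinations l 0 = [[]] := by
  cases l <;> rfl

-- B's reversed fold computes exactly the size-1..4 combinations of its input, in A's order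
lemma pvStep_foldl (ts : List String) :
    ts.reverse.foldl pvStep ([], [], [], [])
      = (pvCombinations ts 1, pvCombinations ts 2, pvCombinations ts 3, pvCombinations ts 4) := by
  induction ts with
  | nil => rfl
  | cons t p ih =>
    rw [List.reverse_cons, List.foldl_append, ih]
    simp [pvStep, pvCombinations, pvCombinations_zero]

lemma foldl_add_pad (l : List (List String)) (v : List (String × String × String × String)) :
    l.foldl (fun variants combo => PySem.Set.add variants (pvPad combo)) v
      = (l.map pvPad).foldl PySem.Set.add v := by
  rw [List.foldl_map]

-- both ports, as functions of the sorted deduplicated pool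
lemma pv_main (ts : List String) :
    (PySem.List.pyRange 1 5 1).foldl
      (fun variants r =>
        (pvCombinations ts r.toNat).foldl
          (fun variants combo => PySem.Set.add variants (pvPad combo)) variants)
      PySem.Set.empty
    = (match ts.reverse.foldl pvStep ([], [], [], []) with
       | (b1, b2, b3, b4) =>
         PySem.Set.ofList ([b1, b2, b3, b4].flatMap (fun bs => bs.map pvPad))) := by
  rw [pvStep_foldl]
  have hr : PySem.List.pyRange 1 5 1 = [1, 2, 3, 4] := by decide
  rw [hr]
  simp only [List.foldl_cons, List.foldl_nil, foldl_add_pad, Int.toNat]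
  rw [PySem.Set.ofList_eq_foldl]
  simp [← List.foldl_append]

-- ===== VERDICT (by name: the statement is the Claim_ definition above) =====
theorem generate_variants_spec : Claim_equal_generate_variants := by
  intro types _
  exact pv_main (PySem.List.sorted (PySem.Set.ofList types) (fun x => x) false)
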